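-- pv_equiv track=rewrite | github.com/kdgit83/KD-Learning-and-Practice-Projects | PyCharm/Udemy/Course_KrishNaik_PythonBootcamp/Pattern_Practice/12_sandglass.py | generate_sandglass
-- ===== SOURCE A (Python) =====
-- def generate_sandglass(n: int) -> list[str]:
--     """
--     Function to return a sandglass pattern of '*' of side n as a list of strings.
--
--     Parameters:
--     n (int): The height of the sandglass.
--
--     Returns:
--     list: A list of strings where each string represents a row of the sandglass pattern.
--
--     Output:
--     A list of strings where each string represents a row in the sandglass pattern.
--
--     Example:
--     Input: 3
--     Output: ['*****', ' *** ', '  *  ', ' *** ', '*****']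
--
--     Input: 4
--     Output: ['*******', ' ***** ', '  ***  ', '   *   ', '  ***  ', ' ***** ', '*******']
--     """
--     # Your code here
--     upper_half = []
--     for i in range(n, 0, -1):
--         stars = '*' * (2 * i - 1)
--         spaces = ' ' * (n - i)
--         upper_half.append(spaces + stars + spaces)
--
--     lower_half = []
--     for i in range(2, n + 1):
--         stars = '*' * (2 * i - 1)
--         spaces = ' ' * (n - i)
--         lower_half.append(spaces + stars + spaces)
--
--     sandglass = upper_half + lower_half
--     return sandglass
-- ===== SOURCE B (Python) =====
-- def generate_sandglass(n: int) -> list[str]: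
--     rows = []
--     for r in range(2 * n - 1):
--         i = 1 + abs(r - (n - 1))
--         stars = '*' * (2 * i - 1)
--         spaces = ' ' * (n - i)
--         rows.append(spaces + stars + spaces)
--     return rows
-- ===== Notes on version B (the rewrite author's own statement) =====
-- stated objective: simpler
-- what changed: Replaces the two separate half-building loops (descending upper, ascending lower) by one loop over all 2n-1 rows that derives each row's star width from its distance to the centre row.
import Mathlib
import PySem

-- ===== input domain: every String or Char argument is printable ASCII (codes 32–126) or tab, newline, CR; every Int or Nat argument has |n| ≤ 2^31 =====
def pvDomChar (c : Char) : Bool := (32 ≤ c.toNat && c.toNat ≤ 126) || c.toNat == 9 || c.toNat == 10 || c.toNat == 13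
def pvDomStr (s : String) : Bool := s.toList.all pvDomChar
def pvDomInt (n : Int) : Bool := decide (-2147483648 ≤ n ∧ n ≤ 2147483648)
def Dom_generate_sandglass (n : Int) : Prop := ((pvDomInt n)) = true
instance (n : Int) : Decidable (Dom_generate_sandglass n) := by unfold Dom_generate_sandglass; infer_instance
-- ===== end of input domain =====

-- B: one loop over all 2n-1 rows driven by distance to the centre, instead of A's two half-building loops.


-- ===== PORT A =====
-- row i of a sandglass of height n: ' '*(n-i) + '*'*(2i-1) + ' '*(n-i)
-- Python's 's' * k is '' for k ≤ 0, exactly what .toNat in List.replicate gives.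
def pvRow (n i : Int) : String :=
  let stars := List.replicate (2 * i - 1).toNat '*'
  let spaces := List.replicate (n - i).toNat ' '
  String.ofList (spaces ++ stars ++ spaces)

def generate_sandglass (n : Int) : List String :=
  let upper_half := (PySem.List.pyRange n 0 (-1)).foldl
    (fun acc i => acc ++ [pvRow n i]) []
  let lower_half := (PySem.List.pyRange 2 (n + 1) 1).foldl
    (fun acc i => acc ++ [pvRow n i]) []
  upper_half ++ lower_half

-- ===== PORT B =====
def generate_sandglass_alt (n : Int) : List String :=
  (PySem.List.pyRange 0 (2 * n - 1) 1).foldl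
    (fun acc r => acc ++ [pvRow n (1 + |r - (n - 1)|)]) []

-- ===== PRECONDITION & SPEC =====
def Spec_generate_sandglass (n : Int) (out : List String) : Prop := out = generate_sandglass_alt n
instance (n : Int) (out : List String) : Decidable (Spec_generate_sandglass n out) := by unfold Spec_generate_sandglass; infer_instance

-- ===== CLAIM (what is proved, stated in full; the proofs are below) =====
def Claim_equal_generate_sandglass : Prop := ∀ (n : Int), Dom_generate_sandglass n → Spec_generate_sandglass n (generate_sandglass n)

-- ===== LEMMAS AND PROOFS =====

-- A as two maps over descending/ascending counters
theorem pvA_eq_maps (n : Int) :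
    generate_sandglass n =
      (List.range n.toNat).map (fun (k : Nat) => pvRow n (n - (k : Int))) ++
      (List.range (n - 1).toNat).map (fun (k : Nat) => pvRow n (2 + (k : Int))) := by
  simp only [generate_sandglass, PySem.List.foldl_append_singleton_eq_map,
    PySem.List.pyRange_neg_one, PySem.List.pyRange_one, List.map_map]
  rw [show n + 1 - 2 = n - 1 from by ring]
  simp [Function.comp_def]

theorem pvB_eq_map (n : Int) :
    generate_sandglass_alt n =
      (List.range (2 * n - 1).toNat).map (fun (k : Nat) => pvRow n (1 + |(k : Int) - (n - 1)|)) := by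
  simp only [generate_sandglass_alt, PySem.List.foldl_append_singleton_eq_map,
    PySem.List.pyRange_one, List.map_map]
  simp [Function.comp_def]

-- ===== VERDICT (by name: the statement is the Claim_ definition above) =====
theorem generate_sandglass_spec : Claim_equal_generate_sandglass := by
  intro n _
  unfold Spec_generate_sandglass
  rw [pvA_eq_maps, pvB_eq_map]
  by_cases h : n ≤ 0
  · have h1 : n.toNat = 0 := by omega
    have h2 : (n - 1).toNat = 0 := by omega
    have h3 : (2 * n - 1).toNat = 0 := by omega
    simp [h1, h2, h3]
  · replace h : 0 < n := by omega
    have hsplit : (2 * n - 1).toNat = n.toNat + (n - 1).toNat := by omega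
    rw [hsplit, List.range_add, List.map_append, List.map_map]
    congr 1
    · apply List.map_congr_left
      intro k hk
      rw [List.mem_range] at hk
      have : |(k : Int) - (n - 1)| = (n - 1) - k := by
        rw [abs_of_nonpos (by omega)]; ring
      rw [this]; congr 1; ring
    · apply List.map_congr_left
      intro k hk
      rw [List.mem_range] at hk
      have : |((n.toNat + k : Nat) : Int) - (n - 1)| = (k : Int) + 1 := by
        rw [abs_of_nonneg (by push_cast; omega)]; push_cast; omega
      simp only [Function.comp]
      rw [this]; congr 1; ring
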